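-- pv_equiv track=rewrite | github.com/ekolik/-Python-Project_Euler | 36-double-base palindromes.py | makepalin
-- ===== SOURCE A (Python) =====
-- def makepalin(n, oddness):
--     res = n
--     if oddness:
--         n //= 10
--     while n > 0:
--         res = res*10 + n%10
--         n //= 10
--     return res
-- ===== SOURCE B (Python) =====
-- def makepalin(n, oddness):
--     if n <= 0:
--         return n
--
--     def mirror(t):
--         # (reverse of t's decimal digits, 10 ** number-of-digits of t)
--         if t <= 0:
--             return (0, 1)
--         r, s = mirror(t // 10)
--         return (t % 10 * s + r, 10 * s)
--
--     r, s = mirror(n // 10 if oddness else n)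
--     return n * s + r
-- ===== Notes on version B (the rewrite author's own statement) =====
-- stated objective: alternative
-- what changed: A threads one accumulator through a while loop that interleaves building the result with consuming n's digits; B computes the mirror independently via a recursive helper returning (reversed digits, 10^digit-count) and attaches it with a single n*s + r combination, with a plain n <= 0 guard where the loop never runs.
import Mathlib
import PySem

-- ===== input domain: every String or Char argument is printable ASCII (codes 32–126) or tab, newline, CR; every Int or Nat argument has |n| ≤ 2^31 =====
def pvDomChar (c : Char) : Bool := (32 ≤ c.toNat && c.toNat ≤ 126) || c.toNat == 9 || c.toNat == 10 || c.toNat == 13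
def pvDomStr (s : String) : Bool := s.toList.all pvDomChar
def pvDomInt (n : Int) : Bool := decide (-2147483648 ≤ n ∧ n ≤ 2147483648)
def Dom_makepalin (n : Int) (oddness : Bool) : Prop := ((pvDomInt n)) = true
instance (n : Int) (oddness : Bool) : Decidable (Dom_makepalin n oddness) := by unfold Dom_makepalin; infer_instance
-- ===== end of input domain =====

-- B replaces A's interleaved digit-accumulation loop by a recursive mirror helper
-- returning (reversed digits, 10^digit-count), combined once with n*s + r (objective: alternative).

-- ===== PORT A =====
-- the 'while n > 0: res = res*10 + n%10; n //= 10' loop, state (n, res)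
def makepalinLoop (n res : Int) : Int :=
  if 0 < n then
    makepalinLoop (PySem.Int.floordiv n 10) (res * 10 + PySem.Int.mod n 10)
  else res
termination_by n.toNat
decreasing_by
  rw [PySem.Int.floordiv_eq_ediv_of_pos (by norm_num)]
  omega

def makepalin (n : Int) (oddness : Bool) : Int :=
  let res := n
  let n := if oddness then PySem.Int.floordiv n 10 else n
  makepalinLoop n res

-- ===== PORT B =====
-- mirror t = (reverse of t's decimal digits, 10 ^ number-of-digits of t)
def mirrorB (t : Int) : Int × Int :=
  if 0 < t then
    let p := mirrorB (PySem.Int.floordiv t 10)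
    (PySem.Int.mod t 10 * p.2 + p.1, 10 * p.2)
  else (0, 1)
termination_by t.toNat
decreasing_by
  rw [PySem.Int.floordiv_eq_ediv_of_pos (by norm_num)]
  omega

def makepalin_alt (n : Int) (oddness : Bool) : Int :=
  if n ≤ 0 then n
  else
    let p := mirrorB (if oddness then PySem.Int.floordiv n 10 else n)
    n * p.2 + p.1

-- ===== PRECONDITION & SPEC =====
def Spec_makepalin (n : Int) (oddness : Bool) (out : Int) : Prop := out = makepalin_alt n oddness
instance (n : Int) (oddness : Bool) (out : Int) : Decidable (Spec_makepalin n oddness out) := by unfold Spec_makepalin; infer_instance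

-- ===== CLAIM (what is proved, stated in full; the proofs are below) =====
def Claim_equal_makepalin : Prop := ∀ (n : Int) (oddness : Bool), Dom_makepalin n oddness → Spec_makepalin n oddness (makepalin n oddness)

-- ===== LEMMAS AND PROOFS =====

-- A's loop computes exactly B's combination res * 10^digits + reversed-digits.
theorem makepalinLoop_eq_mirrorB (n : Int) (res : Int) :
    makepalinLoop n res = res * (mirrorB n).2 + (mirrorB n).1 := by
  by_cases h : 0 < n
  · rw [makepalinLoop, mirrorB, if_pos h, if_pos h]
    rw [makepalinLoop_eq_mirrorB (PySem.Int.floordiv n 10)]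
    ring
  · rw [makepalinLoop, mirrorB, if_neg h, if_neg h]
    ring
termination_by n.toNat
decreasing_by
  rw [PySem.Int.floordiv_eq_ediv_of_pos (by norm_num)]
  omega

theorem makepalin_eq_alt (n : Int) (oddness : Bool) :
    makepalin n oddness = makepalin_alt n oddness := by
  unfold makepalin makepalin_alt
  by_cases hn : n ≤ 0
  · -- loop never runs: its argument is ≤ 0 whether or not oddness divides first
    have hq : PySem.Int.floordiv n 10 ≤ 0 := by
      rw [PySem.Int.floordiv_eq_ediv_of_pos (by norm_num)]; omega
    have hloop : ∀ m : Int, m ≤ 0 → makepalinLoop m n = n := fun m hm => by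
      rw [makepalinLoop, if_neg (by omega)]
    rw [if_pos hn]
    cases oddness
    · simpa using hloop n hn
    · simpa using hloop _ hq
  · rw [if_neg hn, makepalinLoop_eq_mirrorB]

-- ===== VERDICT (by name: the statement is the Claim_ definition above) =====
theorem makepalin_spec : Claim_equal_makepalin := by
  intro n oddness _
  unfold Spec_makepalin
  exact makepalin_eq_alt n oddness
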